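-- pv_equiv track=rewrite | github.com/Richardoooo/Gura-Bot | GuraBotLib/generate.py | get24
-- ===== SOURCE A (Python) =====
-- from itertools import permutations
--
-- ops = ["+","-","*","/"]
--
-- def get24(res_1):
--     if len(res_1[0]) == 1:
--         return res_1
--     else:
--         result = []
--         for j in res_1:
--             per_num = list(permutations(j,2))
--             for i in per_num:
--                 for op in ops:
--                     tmp = j[:]
--                     tmp.remove(i[0])
--                     tmp.remove(i[1])
--                     tmp.append("(" + i[0] + op + i[1] + ")")
--                     result.append(tmp)
--     return get24(result)
-- ===== SOURCE B (Python) =====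
-- ops = ["+", "-", "*", "/"]
--
-- def drop_first(xs, v):
--     k = xs.index(v)
--     return xs[:k] + xs[k+1:]
--
-- def get24(res_1):
--     res = res_1
--     while len(res[0]) > 1:
--         res = [drop_first(drop_first(j, j[p]), j[q]) + ["(" + j[p] + op + j[q] + ")"]
--                for j in res
--                for p in range(len(j))
--                for q in range(len(j)) if q != p
--                for op in ops]
--     return res
-- ===== Notes on version B (the rewrite author's own statement) =====
-- stated objective: idiomatic
-- what changed: Replaces A's tail recursion with mutating inner loops (itertools.permutations, list.remove, append) by an iterative while loop whose next generation is a single comprehension over index pairs using a pure slice-based drop_first helper.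
-- outside the precondition, e.g. on get24([]): A raises IndexError, B raises IndexError; on get24([[]]): A raises IndexError, B returns [[]]
import Mathlib
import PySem

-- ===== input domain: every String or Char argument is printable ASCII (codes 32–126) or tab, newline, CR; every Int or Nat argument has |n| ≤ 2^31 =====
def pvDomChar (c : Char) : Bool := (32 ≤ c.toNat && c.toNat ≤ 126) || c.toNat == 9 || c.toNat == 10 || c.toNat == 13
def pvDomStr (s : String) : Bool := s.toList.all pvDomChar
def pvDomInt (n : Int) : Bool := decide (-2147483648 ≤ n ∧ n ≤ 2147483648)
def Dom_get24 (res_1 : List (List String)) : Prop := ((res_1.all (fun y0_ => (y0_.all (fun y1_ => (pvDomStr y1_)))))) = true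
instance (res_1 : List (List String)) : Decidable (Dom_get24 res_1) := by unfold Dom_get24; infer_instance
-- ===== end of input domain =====

-- B replaces A's tail recursion + mutating inner loops (itertools.permutations, list.remove)
-- by an iterative while loop whose next generation is one comprehension over index pairs with a
-- pure slice-based drop_first; same values, objective: idiomatic (no speed claim).

-- ===== PORT A =====
def opsA : List String := ["+", "-", "*", "/"]

-- hand port of list(itertools.permutations(j, 2)): tuples (j[p], j[q]) in the documented
-- index order 'for p in range(n): for q in range(n): if q != p' — exact for r = 2
def permut2 (j : List String) : List (String × String) :=
  (List.range j.length).foldl (fun acc p =>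
    (List.range j.length).foldl (fun acc q =>
      if q ≠ p then acc ++ [(j.getD p "", j.getD q "")] else acc) acc) []

-- one round of A's else-branch: build `result` by appending, as A does;
-- tmp.remove(v) = PySem.List.remove?; the .getD [] (ValueError) branch is unreachable
-- because both removed values are drawn from j itself
def stepA (res : List (List String)) : List (List String) :=
  res.foldl (fun result j =>
    (permut2 j).foldl (fun result i =>
      opsA.foldl (fun result op =>
        result ++ [((PySem.List.remove? ((PySem.List.remove? j i.1).getD []) i.2).getD [])
                    ++ ["(" ++ i.1 ++ op ++ i.2 ++ ")"]]) result) result) []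

-- A's recursion, with fuel = length of res_1[0] (each round shortens res[0] by one, so this
-- fuel is exact on Pre_; the fuel-0 branch is unreachable there)
def getGo : Nat → List (List String) → List (List String)
  | 0, res => res
  | fuel + 1, res => if (res.headD []).length == 1 then res else getGo fuel (stepA res)

def get24 (res_1 : List (List String)) : List (List String) :=
  getGo (res_1.headD []).length res_1

-- ===== PORT B =====
def opsB : List String := ["+", "-", "*", "/"]

-- drop_first(xs, v) = xs[:k] + xs[k+1:], k = xs.index(v); none (ValueError) is unreachable
def dropFirst (xs : List String) (v : String) : List String :=
  match PySem.List.index? xs v with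
  | some k => xs.take k ++ xs.drop (k + 1)
  | none => []

-- one round: B's comprehension
def stepB (res : List (List String)) : List (List String) :=
  res.flatMap (fun j =>
    (List.range j.length).flatMap (fun p =>
      (List.range j.length).flatMap (fun q =>
        if q ≠ p then
          opsB.map (fun op =>
            dropFirst (dropFirst j (j.getD p "")) (j.getD q "")
              ++ ["(" ++ j.getD p "" ++ op ++ j.getD q "" ++ ")"])
        else [])))

-- B's while loop, same fuel bound as A's port
def altGo : Nat → List (List String) → List (List String)
  | 0, res => res
  | fuel + 1, res => if (res.headD []).length > 1 then altGo fuel (stepB res) else res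

def get24_alt (res_1 : List (List String)) : List (List String) :=
  altGo (res_1.headD []).length res_1

-- ===== PRECONDITION & SPEC =====
-- Pre_ excludes inputs whose first inner list is empty: there Python A either raises
-- IndexError (e.g. [] or [[]]) or, when some later list still has ≥ 2 entries, returns a
-- value that depends on the accident that only res_1[0] is tested — a malformed-input
-- corner where B's stopping at once is equally defensible.
def Pre_get24 (res_1 : List (List String)) : Prop := 1 ≤ (res_1.headD []).length
instance (res_1 : List (List String)) : Decidable (Pre_get24 res_1) := by unfold Pre_get24; infer_instance

def pvWitness_get24 : List (List String) := [["1", "2", "3"], ["4", "5", "6"]]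

def Spec_get24 (res_1 : List (List String)) (out : List (List String)) : Prop := out = get24_alt res_1
instance (res_1 : List (List String)) (out : List (List String)) : Decidable (Spec_get24 res_1 out) := by unfold Spec_get24; infer_instance

-- ===== CLAIM (what is proved, stated in full; the proofs are below) =====
def Claim_equal_get24 : Prop := ∀ (res_1 : List (List String)), Dom_get24 res_1 → Pre_get24 res_1 → Spec_get24 res_1 (get24 res_1)

-- ===== LEMMAS AND PROOFS =====

-- A's value-removal equals B's slice-based one, with no membership hypothesis:
-- when v is absent both sides return []
lemma remove_getD_eq_dropFirst (xs : List String) (v : String) :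
    (PySem.List.remove? xs v).getD [] = dropFirst xs v := by
  induction xs with
  | nil => simp [dropFirst, PySem.List.remove?, PySem.List.index?]
  | cons x t ih =>
    by_cases hxv : x = v
    · subst hxv
      rw [PySem.List.remove?_cons_self, dropFirst, PySem.List.index?_cons_self]
      simp
    · rw [PySem.List.remove?_cons_of_ne t hxv, dropFirst, PySem.List.index?_cons_of_ne t hxv]
      cases h : PySem.List.index? t v with
      | none =>
        have hnm : v ∉ t := (PySem.List.index?_eq_none_iff t v).mp h
        have : PySem.List.remove? t v = none := (PySem.List.remove?_eq_none_iff t v).mpr hnm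
        simp [this]
      | some k =>
        cases hr : PySem.List.remove? t v with
        | none =>
          exfalso
          have hnm : v ∉ t := (PySem.List.remove?_eq_none_iff t v).mp hr
          rw [(PySem.List.index?_eq_none_iff t v).mpr hnm] at h
          simp at h
        | some r =>
          have ihr : r = List.take k t ++ List.drop (k + 1) t := by
            have := ih
            rw [hr, dropFirst, h] at this
            simpa using this
          simp [ihr, List.take_succ_cons, List.drop_succ_cons]

lemma filter_map_eq_flatMap_if {α β : Type} (l : List α) (c : α → Bool) (f : α → β) :
    (l.filter c).map f = l.flatMap (fun x => if c x then [f x] else []) := by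
  induction l with
  | nil => rfl
  | cons x t ih => by_cases h : c x <;> simp [h, ih]

lemma permut2_eq (j : List String) :
    permut2 j = (List.range j.length).flatMap (fun p =>
      (List.range j.length).flatMap (fun q =>
        if q ≠ p then [(j.getD p "", j.getD q "")] else [])) := by
  unfold permut2
  rw [PySem.List.foldl_congr_mem _ _ (fun acc p =>
        acc ++ ((List.range j.length).filter (fun q => decide (q ≠ p))).map
          (fun q => (j.getD p "", j.getD q ""))) _
      (fun acc p _ => PySem.List.foldl_append_ite _ _ _ _),
    PySem.List.foldl_append_eq_flatMap]
  simp only [List.nil_append]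
  refine List.flatMap_congr ?_
  intro p _
  rw [filter_map_eq_flatMap_if]
  simp

lemma stepA_eq_stepB (res : List (List String)) : stepA res = stepB res := by
  unfold stepA stepB
  rw [PySem.List.foldl_congr_mem _ _ (fun result j =>
        result ++ (permut2 j).flatMap (fun i =>
          opsA.map (fun op =>
            ((PySem.List.remove? ((PySem.List.remove? j i.1).getD []) i.2).getD [])
              ++ ["(" ++ i.1 ++ op ++ i.2 ++ ")"]))) _ ?side,
    PySem.List.foldl_append_eq_flatMap]
  case side =>
    intro acc j _
    rw [PySem.List.foldl_congr_mem _ _ (fun result i =>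
          result ++ opsA.map (fun op =>
            ((PySem.List.remove? ((PySem.List.remove? j i.1).getD []) i.2).getD [])
              ++ ["(" ++ i.1 ++ op ++ i.2 ++ ")"])) _ ?inner,
      PySem.List.foldl_append_eq_flatMap]
    case inner =>
      intro acc' i _
      rw [PySem.List.foldl_append_singleton_eq_map]
  simp only [List.nil_append]
  refine List.flatMap_congr ?_
  intro j _
  rw [permut2_eq, List.flatMap_assoc]
  refine List.flatMap_congr ?_
  intro p _
  rw [List.flatMap_assoc]
  refine List.flatMap_congr ?_
  intro q _
  by_cases h : q ≠ p
  · rw [if_pos h, if_pos h]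
    simp only [List.flatMap_cons, List.flatMap_nil, List.append_nil]
    refine List.map_congr_left ?_
    intro op _
    simp [remove_getD_eq_dropFirst]
  · simp [h]

lemma range_two_cons (m : Nat) :
    List.range (m + 2) = 0 :: 1 :: (List.range m).map (· + 2) := by
  rw [List.range_succ_eq_map, List.range_succ_eq_map, List.map_cons, List.map_map]
  refine congrArg _ (congrArg _ ?_)
  refine List.map_congr_left ?_
  intro a _
  simp

lemma stepB_head (x₀ x₁ : String) (t : List String) (rest : List (List String)) :
    (stepB ((x₀ :: x₁ :: t) :: rest)).headD []
      = t ++ ["(" ++ x₀ ++ "+" ++ x₁ ++ ")"] := by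
  have hlen : (x₀ :: x₁ :: t).length = t.length + 2 := by simp
  have hd1 : dropFirst (x₀ :: x₁ :: t) x₀ = x₁ :: t := by
    rw [dropFirst, PySem.List.index?_cons_self]
    simp
  have hd2 : dropFirst (x₁ :: t) x₁ = t := by
    rw [dropFirst, PySem.List.index?_cons_self]
    simp
  simp only [stepB, List.flatMap_cons, hlen, range_two_cons, List.getD_cons_zero,
    List.getD_cons_succ]
  simp [hd1, hd2, opsB]

lemma go_eq : ∀ (fuel : Nat) (res : List (List String)),
    1 ≤ (res.headD []).length → getGo fuel res = altGo fuel res := by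
  intro fuel
  induction fuel with
  | zero => intro res _; rfl
  | succ fuel ih =>
    intro res h1
    cases res with
    | nil => simp at h1
    | cons j rest =>
      simp only [List.headD_cons] at h1
      by_cases h : j.length = 1
      · simp [getGo, altGo, h]
      · have h2 : 2 ≤ j.length := by omega
        have hgt : 1 < j.length := by omega
        have hA : getGo (fuel + 1) (j :: rest) = getGo fuel (stepA (j :: rest)) := by
          simp [getGo, h]
        have hB : altGo (fuel + 1) (j :: rest) = altGo fuel (stepB (j :: rest)) := by
          simp [altGo, hgt]
        rw [hA, hB, stepA_eq_stepB]
        apply ih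
        match j, h2 with
        | x₀ :: x₁ :: t, _ =>
          rw [stepB_head]
          simp

-- ===== VERDICT (by name: the statement is the Claim_ definition above) =====
theorem get24_spec : Claim_equal_get24 := by
  intro res_1 _ hpre
  unfold Spec_get24 get24 get24_alt
  exact go_eq _ _ hpre
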